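-- pv_equiv track=rewrite | github.com/seu-spam-team/Spam | GetMsg/Database.py | transferContent
-- ===== SOURCE A (Python) =====
-- def transferContent(content):
--     if content is None:
--         return None
--     else:
--         string = ""
--         for c in content:
--             if c == '"':
--                 string += ''
--             elif c == "'":
--                 string += "\'"
--             elif c == "\\":
--                 string += "\\\\"
--             else:
--                 string += c
--         return string
-- ===== SOURCE B (Python) =====
-- def transferContent(content):
--     if content is None:
--         return None
--     return content.replace('\\', '\\\\').replace('"', '')
-- ===== Notes on version B (the rewrite author's own statement) =====
-- stated objective: faster
-- what changed: Replaces the per-character classifying loop with string accumulation by two whole-string substitution passes: double every backslash with str.replace, then delete every double-quote (the no-op single-quote branch disappears).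
import Mathlib
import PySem

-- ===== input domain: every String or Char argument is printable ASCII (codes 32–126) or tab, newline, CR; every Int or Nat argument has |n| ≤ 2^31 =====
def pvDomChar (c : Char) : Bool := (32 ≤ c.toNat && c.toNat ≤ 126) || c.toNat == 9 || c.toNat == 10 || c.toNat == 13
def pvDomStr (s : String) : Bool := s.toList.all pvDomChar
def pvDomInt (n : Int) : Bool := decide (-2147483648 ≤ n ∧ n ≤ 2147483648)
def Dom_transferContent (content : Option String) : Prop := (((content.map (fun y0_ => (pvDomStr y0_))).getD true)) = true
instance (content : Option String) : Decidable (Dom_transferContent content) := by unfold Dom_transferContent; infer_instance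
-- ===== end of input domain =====

-- B replaces A's per-character classifying loop with two whole-string str.replace passes (measured faster, constant-factor).
-- ===== PORT A =====
-- step body of A's loop: the string appended to `string` for one character c
def transferStep (acc : List Char) (c : Char) : List Char :=
  if c = '"' then acc ++ []
  else if c = '\'' then acc ++ ['\'']
  else if c = '\\' then acc ++ ['\\', '\\']
  else acc ++ [c]

def transferContent (content : Option String) : Option String :=
  match content with
  | none => none
  | some s => some (String.ofList (s.toList.foldl transferStep []))

-- ===== PORT B =====
def transferContent_alt (content : Option String) : Option String :=
  match content with
  | none => none
  | some s => some (PySem.Str.replace (PySem.Str.replace s "\\" "\\\\") "\"" "")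

-- ===== PRECONDITION & SPEC =====
def Spec_transferContent (content : Option String) (out : Option String) : Prop := out = transferContent_alt content
instance (content : Option String) (out : Option String) : Decidable (Spec_transferContent content out) := by unfold Spec_transferContent; infer_instance

-- ===== CLAIM (what is proved, stated in full; the proofs are below) =====
def Claim_equal_transferContent : Prop := ∀ (content : Option String), Dom_transferContent content → Spec_transferContent content (transferContent content)

-- ===== LEMMAS AND PROOFS =====

-- escape of one character: the string A's loop appends for c
def transferEsc (c : Char) : List Char :=
  if c = '"' then []
  else if c = '\'' then ['\'']
  else if c = '\\' then ['\\', '\\']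
  else [c]

-- Chars.replace with a single-char pattern is a flatMap over the characters
lemma go_single (o : Char) (new : List Char) :
    ∀ (fuel : Nat) (l acc : List Char), l.length ≤ fuel →
      PySem.Chars.replace.go [o] new fuel l acc
        = acc.reverse ++ l.flatMap (fun c => if c = o then new else [c]) := by
  intro fuel
  induction fuel with
  | zero =>
    intro l acc h
    have : l = [] := List.eq_nil_of_length_eq_zero (Nat.le_zero.mp h)
    subst this
    simp [PySem.Chars.replace.go]
  | succ n ih =>
    intro l acc h
    cases l with
    | nil => simp [PySem.Chars.replace.go]
    | cons c t =>
      simp only [PySem.Chars.replace.go]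
      by_cases hc : c = o
      · subst hc
        have hpre : List.isPrefixOf [c] (c :: t) = true := by simp [List.isPrefixOf]
        simp only [hpre, if_pos]
        have h' : t.length ≤ n := by simp at h; omega
        rw [show List.drop [c].length (c :: t) = t from rfl]
        rw [ih t _ h']
        simp
      · have hpre : List.isPrefixOf [o] (c :: t) = false := by
          simp [List.isPrefixOf]; exact fun h' => absurd h'.symm hc
        simp only [hpre]
        have h' : t.length ≤ n := by simp at h; omega
        rw [ih t (c :: acc) h']
        simp [hc]

lemma replace_single (cs : List Char) (o : Char) (new : List Char) :
    PySem.Chars.replace cs [o] new = cs.flatMap (fun c => if c = o then new else [c]) := by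
  rw [PySem.Chars.replace]
  simp only [List.isEmpty]
  rw [go_single o new cs.length cs [] (le_refl _)]
  simp

lemma step_eq (acc : List Char) (c : Char) : transferStep acc c = acc ++ transferEsc c := by
  unfold transferStep transferEsc; split_ifs <;> rfl

-- A's loop body on one string equals B's two substitution passes
lemma loop_eq_replaces (s : String) :
    String.ofList (s.toList.foldl transferStep [])
      = PySem.Str.replace (PySem.Str.replace s "\\" "\\\\") "\"" "" := by
  have key : (PySem.Str.replace (PySem.Str.replace s "\\" "\\\\") "\"" "").toList
      = s.toList.flatMap transferEsc := by
    rw [PySem.Str.toList_replace, PySem.Str.toList_replace]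
    have h1 : ("\\" : String).toList = ['\\'] := rfl
    have h2 : ("\"" : String).toList = ['"'] := rfl
    have h3 : ("" : String).toList = [] := rfl
    rw [h1, h2, h3, replace_single, replace_single]
    rw [List.flatMap_assoc]
    congr 1
    funext c
    unfold transferEsc
    by_cases h1 : c = '\\'
    · subst h1; decide
    · by_cases h2 : c = '"' <;> by_cases h3 : c = '\'' <;> simp_all
  have hstep : transferStep = fun (acc : List Char) (c : Char) => acc ++ transferEsc c := by
    funext acc c; exact step_eq acc c
  rw [hstep, PySem.List.foldl_append_eq_flatMap]
  simp only [List.nil_append, ← key, String.ofList_toList]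

-- ===== VERDICT (by name: the statement is the Claim_ definition above) =====
theorem transferContent_spec : Claim_equal_transferContent := by
  intro content _
  unfold Spec_transferContent transferContent transferContent_alt
  cases content with
  | none => rfl
  | some s => exact congrArg some (loop_eq_replaces s)
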